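-- pv_equiv track=rewrite | github.com/KizyakaLover/PZ_IS-23 | Khalanskiy_PZ-2.py | number_of_weekend
-- ===== SOURCE A (Python) =====
-- def number_of_weekend(K):
--     weekday_number = 2
--     day_counter = 1
--     while day_counter != K:
--         weekday_number += 1
--         day_counter += 1
--         if weekday_number == 7:
--             weekday_number = 0
--     return weekday_number
-- ===== SOURCE B (Python) =====
-- def number_of_weekend(K):
--     return (K + 1) % 7
-- ===== Notes on version B (the rewrite author's own statement) =====
-- stated objective: faster
-- what changed: Replaces the O(K) day-by-day counting loop with the closed-form modular expression (K + 1) % 7.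
import Mathlib
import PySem

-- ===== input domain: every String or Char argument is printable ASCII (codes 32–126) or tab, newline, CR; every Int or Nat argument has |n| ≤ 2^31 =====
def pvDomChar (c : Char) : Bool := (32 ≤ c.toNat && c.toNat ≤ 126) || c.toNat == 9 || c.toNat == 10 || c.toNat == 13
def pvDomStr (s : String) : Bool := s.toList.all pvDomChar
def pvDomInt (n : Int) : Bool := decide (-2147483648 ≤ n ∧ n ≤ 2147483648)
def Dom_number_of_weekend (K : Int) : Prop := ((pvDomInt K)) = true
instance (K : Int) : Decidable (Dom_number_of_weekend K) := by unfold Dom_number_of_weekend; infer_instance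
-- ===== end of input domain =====

-- B replaces A's O(K) day-by-day counting loop with the closed form (K + 1) % 7 (asymptotically faster).

-- ===== PORT A =====
-- the while-loop of A; the final 'else w' branch is a totality guard only:
-- Python loops forever when day_counter overshoots K, which Pre_ excludes (K ≥ 1).
def numWeekLoop (K w c : Int) : Int :=
  if c = K then w
  else if _h : c < K then
    numWeekLoop K (if w + 1 = 7 then 0 else w + 1) (c + 1)
  else w
termination_by (K - c).toNat
decreasing_by omega

def number_of_weekend (K : Int) : Int := numWeekLoop K 2 1

-- ===== PORT B =====
def number_of_weekend_alt (K : Int) : Int := PySem.Int.mod (K + 1) 7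

-- ===== PRECONDITION & SPEC =====
-- Pre_ requires a positive K; otherwise A's while-loop never terminates (the day counter only increases past it).
def Pre_number_of_weekend (K : Int) : Prop := 1 ≤ K
instance (K : Int) : Decidable (Pre_number_of_weekend K) := by unfold Pre_number_of_weekend; infer_instance
def pvWitness_number_of_weekend : Int := (9)
def Spec_number_of_weekend (K : Int) (out : Int) : Prop := out = number_of_weekend_alt K
instance (K : Int) (out : Int) : Decidable (Spec_number_of_weekend K out) := by unfold Spec_number_of_weekend; infer_instance

-- ===== CLAIM (what is proved, stated in full; the proofs are below) =====
def Claim_equal_number_of_weekend : Prop := ∀ (K : Int), Dom_number_of_weekend K → Pre_number_of_weekend K → Spec_number_of_weekend K (number_of_weekend K)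

-- ===== LEMMAS AND PROOFS =====

lemma numWeekLoop_eq (K : Int) : ∀ (n : Nat) (w c : Int), (K - c).toNat = n → c ≤ K →
    0 ≤ w → w < 7 → numWeekLoop K w c = PySem.Int.mod (w + (K - c)) 7 := by
  intro n
  induction n with
  | zero =>
    intro w c hn hc hw0 hw7
    have hck : c = K := by omega
    rw [numWeekLoop, if_pos hck, hck]
    rw [PySem.Int.mod_eq_emod_of_pos (by norm_num)]
    simp
    exact (Int.emod_eq_of_lt hw0 hw7).symm
  | succ m ih =>
    intro w c hn hc hw0 hw7
    have hck : c ≠ K := by omega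
    have hlt : c < K := by omega
    rw [numWeekLoop, if_neg hck, dif_pos hlt]
    rw [ih (if w + 1 = 7 then 0 else w + 1) (c + 1) (by omega) (by omega)
        (by split <;> omega) (by split <;> omega)]
    rw [PySem.Int.mod_eq_emod_of_pos (by norm_num), PySem.Int.mod_eq_emod_of_pos (by norm_num)]
    split
    · next h7 =>
      have : (0 : Int) + (K - (c + 1)) = (w + (K - c)) - 7 := by omega
      rw [this, Int.sub_emod_right]
    · have : (w + 1) + (K - (c + 1)) = w + (K - c) := by omega
      rw [this]

-- ===== VERDICT (by name: the statement is the Claim_ definition above) =====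
theorem number_of_weekend_spec : Claim_equal_number_of_weekend := by
  intro K _ hpre
  unfold Spec_number_of_weekend number_of_weekend number_of_weekend_alt
  rw [numWeekLoop_eq K (K - 1).toNat 2 1 rfl hpre (by omega) (by omega)]
  congr 1
  omega
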